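-- pv_equiv track=rewrite | github.com/rafacasa/leetcode-solutions | 75_problem_22_1657.py | closeStrings
-- ===== SOURCE A (Python) =====
-- def closeStrings(word1: str, word2: str) -> bool:
--     if len(word1) != len(word2):
--         return False
--
--     letters1 = set(word1)
--     letters2 = set(word2)
--
--     if letters2 != letters1:
--         return False
--
--     cnt_chars_1 = {}
--
--     for letter in word1:
--         cnt = cnt_chars_1.get(letter, 0)
--         cnt_chars_1[letter] = cnt + 1
--
--     cnt_chars_2 = {}
--
--     for letter in word2:
--         cnt = cnt_chars_2.get(letter, 0)
--         cnt_chars_2[letter] = cnt + 1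
--
--     list_cnt_chars_1 = [c for c in cnt_chars_1.values()]
--     list_cnt_chars_1.sort()
--     list_cnt_chars_2 = [c for c in cnt_chars_2.values()]
--     list_cnt_chars_2.sort()
--
--     return list_cnt_chars_1 == list_cnt_chars_2
-- ===== SOURCE B (Python) =====
-- def _same_multiset(xs, ys):
--     return all(xs.count(v) == ys.count(v) for v in xs + ys)
--
--
-- def closeStrings(word1: str, word2: str) -> bool:
--     if len(word1) != len(word2):
--         return False
--     if set(word1) != set(word2):
--         return False
--     chars1 = list(word1)
--     chars2 = list(word2)
--     counts1 = [chars1.count(ch) for ch in dict.fromkeys(chars1)]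
--     counts2 = [chars2.count(ch) for ch in dict.fromkeys(chars2)]
--     return _same_multiset(counts1, counts2)
-- ===== Notes on version B (the rewrite author's own statement) =====
-- stated objective: alternative
-- what changed: B drops the hand-rolled counting dict and the sort: it derives each distinct letter's count directly with list.count over an ordered dedup, and compares the two count lists as multisets by occurrence counting (_same_multiset) instead of sorting them and comparing lists.
import Mathlib
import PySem

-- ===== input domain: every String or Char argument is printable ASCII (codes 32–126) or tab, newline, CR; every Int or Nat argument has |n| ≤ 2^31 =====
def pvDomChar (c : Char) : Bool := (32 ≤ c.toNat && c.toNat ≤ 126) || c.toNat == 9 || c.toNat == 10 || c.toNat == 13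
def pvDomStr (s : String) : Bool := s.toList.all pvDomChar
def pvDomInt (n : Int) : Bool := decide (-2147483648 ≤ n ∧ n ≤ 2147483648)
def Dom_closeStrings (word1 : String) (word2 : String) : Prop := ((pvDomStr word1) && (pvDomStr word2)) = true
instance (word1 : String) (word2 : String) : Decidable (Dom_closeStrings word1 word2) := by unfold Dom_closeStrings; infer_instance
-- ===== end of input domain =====

-- B replaces A's counting dict + sort-and-compare by per-distinct-letter list.count and a
-- count-based multiset comparison of the two count lists; alternative decomposition, not claimed faster.

-- ===== PORT A =====
def closeStrings (word1 : String) (word2 : String) : Bool :=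
  if PySem.Str.len word1 ≠ PySem.Str.len word2 then
    false
  else
    let letters1 : PySem.Set Char := PySem.Set.ofList word1.toList
    let letters2 : PySem.Set Char := PySem.Set.ofList word2.toList
    if ¬ (PySem.Set.equal letters2 letters1 = true) then
      false
    else
      let cnt1 : PySem.Dict Char Int :=
        word1.toList.foldl (fun d letter => d.insert letter (d.getD letter 0 + 1)) PySem.Dict.empty
      let cnt2 : PySem.Dict Char Int :=
        word2.toList.foldl (fun d letter => d.insert letter (d.getD letter 0 + 1)) PySem.Dict.empty
      let list1 := PySem.List.sorted (PySem.Dict.values cnt1) (fun c => c) false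
      let list2 := PySem.List.sorted (PySem.Dict.values cnt2) (fun c => c) false
      list1 == list2

-- ===== PORT B =====
def sameMultiset (xs : List Int) (ys : List Int) : Bool :=
  (xs ++ ys).all (fun v => xs.count v == ys.count v)

def closeStrings_alt (word1 : String) (word2 : String) : Bool :=
  if PySem.Str.len word1 ≠ PySem.Str.len word2 then
    false
  else if ¬ (PySem.Set.equal (PySem.Set.ofList word1.toList) (PySem.Set.ofList word2.toList) = true) then
    false
  else
    let chars1 := word1.toList
    let chars2 := word2.toList
    let counts1 := (PySem.List.dedup chars1).map (fun ch => (chars1.count ch : Int))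
    let counts2 := (PySem.List.dedup chars2).map (fun ch => (chars2.count ch : Int))
    sameMultiset counts1 counts2

-- ===== PRECONDITION & SPEC =====
def Spec_closeStrings (word1 : String) (word2 : String) (out : Bool) : Prop := out = closeStrings_alt word1 word2
instance (word1 : String) (word2 : String) (out : Bool) : Decidable (Spec_closeStrings word1 word2 out) := by unfold Spec_closeStrings; infer_instance

-- ===== CLAIM (what is proved, stated in full; the proofs are below) =====
def Claim_equal_closeStrings : Prop := ∀ (word1 : String) (word2 : String), Dom_closeStrings word1 word2 → Spec_closeStrings word1 word2 (closeStrings word1 word2)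

-- ===== LEMMAS AND PROOFS =====

theorem sameMultiset_iff (xs ys : List Int) : sameMultiset xs ys = true ↔ xs.Perm ys := by
  unfold sameMultiset
  simp only [List.all_eq_true, List.mem_append, beq_iff_eq, List.perm_iff_count]
  constructor
  · intro h v
    by_cases hv : v ∈ xs ∨ v ∈ ys
    · exact h v hv
    · push Not at hv
      rw [List.count_eq_zero_of_not_mem hv.1, List.count_eq_zero_of_not_mem hv.2]
  · intro h v _
    exact h v

theorem set_equal_comm {α : Type} [BEq α] [LawfulBEq α] (s t : PySem.Set α) :
    PySem.Set.equal s t = PySem.Set.equal t s := by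
  rw [Bool.eq_iff_iff, PySem.Set.equal_iff, PySem.Set.equal_iff]
  constructor <;> intro h x <;> exact (h x).symm

theorem values_counter_eq (l : List Char) :
    (PySem.Dict.counter l).values = (PySem.List.dedup l).map (fun ch => (l.count ch : Int)) := by
  rw [PySem.Dict.values_eq_map_keys _ (PySem.Dict.nodup_keys_counter l) 0,
      PySem.Dict.keys_counter, PySem.List.dedup_eq_ofList]
  exact List.map_congr_left (fun ch _ => PySem.Dict.getD_counter l ch)

-- ===== VERDICT (by name: the statement is the Claim_ definition above) =====
theorem closeStrings_spec : Claim_equal_closeStrings := by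
  intro word1 word2 _
  unfold Spec_closeStrings
  simp only [closeStrings, closeStrings_alt]
  rw [set_equal_comm]
  split_ifs with h1 h2
  · rfl
  · rw [PySem.Dict.foldl_insert_getD_add_one_eq_counter,
        PySem.Dict.foldl_insert_getD_add_one_eq_counter,
        values_counter_eq, values_counter_eq, Bool.eq_iff_iff, beq_iff_eq, sameMultiset_iff,
        PySem.List.sorted_id_eq_sorted_id_iff_perm]
  · rfl
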